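-- pv_equiv track=rewrite | github.com/NinoesJo/JohanFinalProjectChemistry | main.py | grabSubscript
-- ===== SOURCE A (Python) =====
-- def grabSubscript(compound, start_index):
--     end_index = start_index
--     while end_index < len(compound):
--         if not compound[end_index].isdigit():
--             break
--         end_index += 1
--
--     if start_index == end_index:
--         return 0
--
--     return int(compound[start_index: end_index])
-- ===== SOURCE B (Python) =====
-- def grabSubscript(compound, start_index):
--     value = 0
--     i = start_index
--     while i < len(compound) and compound[i].isdigit():
--         value = value * 10 + int(compound[i])
--         i += 1
--     return value
-- ===== Notes on version B (the rewrite author's own statement) =====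
-- stated objective: simpler
-- what changed: B parses the subscript in a single accumulation pass (running value = value*10 + digit), eliminating A's end-index boundary search, the slice, the int()-of-slice conversion and the separate empty-case return.
-- outside the precondition, e.g. on grabSubscript('12', -1): A returns 2, B returns 212; on grabSubscript('a12', -2): A raises ValueError, B returns 12
import Mathlib
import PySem

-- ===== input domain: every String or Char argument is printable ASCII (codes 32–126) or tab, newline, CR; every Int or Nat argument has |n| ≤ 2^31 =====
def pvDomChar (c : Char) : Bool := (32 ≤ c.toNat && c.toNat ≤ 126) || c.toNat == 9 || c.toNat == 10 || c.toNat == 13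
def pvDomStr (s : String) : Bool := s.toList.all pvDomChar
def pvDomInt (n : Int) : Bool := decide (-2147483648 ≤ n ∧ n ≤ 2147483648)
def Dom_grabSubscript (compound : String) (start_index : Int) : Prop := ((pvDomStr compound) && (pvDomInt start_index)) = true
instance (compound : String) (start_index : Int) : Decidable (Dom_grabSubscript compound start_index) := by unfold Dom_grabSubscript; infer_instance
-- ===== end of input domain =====

-- B replaces A's boundary search + slice + int(slice) by a single accumulation pass (objective: simpler).

-- ===== PORT A =====
-- hand port of int(s): exact on the nonempty all-digit ASCII slices A builds here
-- (agrees with PySem.Int.ofStr? there, whose digit parser is a private definition); none = ValueError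
def pvIntOfDigits (cs : List Char) : Option Int :=
  if cs ≠ [] ∧ cs.all PySem.Chars.isdigit then
    some (cs.foldl (fun v c => v * 10 + ((c.toNat : Int) - 48)) 0)
  else none

-- the while-loop searching end_index; fuel bounds the number of iterations
def grabScanA (s : List Char) (e : Int) : Nat → Int
  | 0 => e
  | f + 1 =>
    if e < (s.length : Int) then
      match PySem.List.pyGet? s e with
      | some c => if PySem.Chars.isdigit c then grabScanA s (e + 1) f else e
      | none => e          -- IndexError: unreachable under Pre_ (0 ≤ e)
    else e

def grabSubscript (compound : String) (start_index : Int) : Int :=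
  let s := compound.toList
  let end_index := grabScanA s start_index (((s.length : Int) - start_index).toNat + 1)
  if start_index = end_index then 0
  else (pvIntOfDigits (PySem.List.slice s (some start_index) (some end_index))).getD 0
       -- ValueError of int(): unreachable under Pre_

-- ===== PORT B =====
def grabLoopB (s : List Char) (i : Int) (value : Int) : Nat → Int
  | 0 => value
  | f + 1 =>
    if i < (s.length : Int) then
      match PySem.List.pyGet? s i with
      | some c =>
        if PySem.Chars.isdigit c then grabLoopB s (i + 1) (value * 10 + ((c.toNat : Int) - 48)) f
        else value
      | none => value      -- unreachable under Pre_ (0 ≤ i)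
    else value

def grabSubscript_alt (compound : String) (start_index : Int) : Int :=
  grabLoopB compound.toList start_index 0 (((compound.toList.length : Int) - start_index).toNat + 1)

-- ===== PRECONDITION & SPEC =====
-- Pre_ restricts to the function's natural domain 0 ≤ start_index: with a negative start A scans via
-- Python's negative-index wraparound, returning values mixing tail and head digits or raising
-- ValueError on int('') — accidental artefacts of negative indexing, not subscript parsing.
def Pre_grabSubscript (compound : String) (start_index : Int) : Prop := 0 ≤ start_index
instance (compound : String) (start_index : Int) : Decidable (Pre_grabSubscript compound start_index) := by unfold Pre_grabSubscript; infer_instance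
def pvWitness_grabSubscript : String × Int := ("H2O", 1)

def Spec_grabSubscript (compound : String) (start_index : Int) (out : Int) : Prop := out = grabSubscript_alt compound start_index
instance (compound : String) (start_index : Int) (out : Int) : Decidable (Spec_grabSubscript compound start_index out) := by unfold Spec_grabSubscript; infer_instance

-- ===== CLAIM (what is proved, stated in full; the proofs are below) =====
def Claim_equal_grabSubscript : Prop := ∀ (compound : String) (start_index : Int), Dom_grabSubscript compound start_index → Pre_grabSubscript compound start_index → Spec_grabSubscript compound start_index (grabSubscript compound start_index)

-- ===== LEMMAS AND PROOFS =====

-- A's scan lands at n + (number of leading digits from position n)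
theorem grabScanA_eq (s : List Char) (n : Nat) (fuel : Nat) (hf : s.length - n < fuel) :
    grabScanA s (n : Int) fuel =
      ((n : Int) + (((s.drop n).takeWhile PySem.Chars.isdigit).length : Int)) := by
  induction fuel generalizing n with
  | zero => omega
  | succ f ih =>
    unfold grabScanA
    by_cases hn : n < s.length
    · have hlt : (n : Int) < (s.length : Int) := by exact_mod_cast hn
      simp only [hlt, if_pos, PySem.List.pyGet?_natCast]
      have hget : s[n]? = some s[n] := List.getElem?_eq_getElem hn
      rw [hget]
      have hdrop : s.drop n = s[n] :: s.drop (n + 1) := List.drop_eq_getElem_cons hn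
      by_cases hd : PySem.Chars.isdigit s[n]
      · simp only [hd, if_pos]
        have : ((n : Int) + 1) = ((n + 1 : Nat) : Int) := by push_cast; ring
        rw [this, ih (n + 1) (by omega)]
        rw [hdrop, List.takeWhile_cons]
        simp only [hd, if_true, List.length_cons]
        push_cast; omega
      · have hd' : PySem.Chars.isdigit s[n] = false := by simpa using hd
        rw [hdrop, List.takeWhile_cons, hd']
        simp [hd']
    · have hge : ¬ ((n : Int) < (s.length : Int)) := by exact_mod_cast hn
      rw [if_neg hge]
      have : s.drop n = [] := List.drop_eq_nil_of_le (by omega)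
      simp [this]

-- B's loop folds the digit accumulation over the leading digits from position n
theorem grabLoopB_eq (s : List Char) (n : Nat) (v : Int) (fuel : Nat) (hf : s.length - n < fuel) :
    grabLoopB s (n : Int) v fuel =
      ((s.drop n).takeWhile PySem.Chars.isdigit).foldl (fun v c => v * 10 + ((c.toNat : Int) - 48)) v := by
  induction fuel generalizing n v with
  | zero => omega
  | succ f ih =>
    unfold grabLoopB
    by_cases hn : n < s.length
    · have hlt : (n : Int) < (s.length : Int) := by exact_mod_cast hn
      simp only [hlt, if_pos, PySem.List.pyGet?_natCast]
      have hget : s[n]? = some s[n] := List.getElem?_eq_getElem hn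
      rw [hget]
      have hdrop : s.drop n = s[n] :: s.drop (n + 1) := List.drop_eq_getElem_cons hn
      by_cases hd : PySem.Chars.isdigit s[n]
      · simp only [hd, if_pos]
        have h1 : ((n : Int) + 1) = ((n + 1 : Nat) : Int) := by push_cast; ring
        rw [h1, ih (n + 1) _ (by omega)]
        rw [hdrop, List.takeWhile_cons]
        simp [hd]
      · have hd' : PySem.Chars.isdigit s[n] = false := by simpa using hd
        rw [hdrop, List.takeWhile_cons, hd']
        simp [hd']
    · have hge : ¬ ((n : Int) < (s.length : Int)) := by exact_mod_cast hn
      rw [if_neg hge]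
      have : s.drop n = [] := List.drop_eq_nil_of_le (by omega)
      simp [this]

-- ===== VERDICT (by name: the statement is the Claim_ definition above) =====
theorem grabSubscript_spec : Claim_equal_grabSubscript := by
  intro compound start_index _hdom hpre
  unfold Spec_grabSubscript grabSubscript grabSubscript_alt
  obtain ⟨n, rfl⟩ : ∃ m : Nat, start_index = (m : Int) :=
    ⟨start_index.toNat, (Int.toNat_of_nonneg hpre).symm⟩
  set s := compound.toList with hs
  set ds := (s.drop n).takeWhile PySem.Chars.isdigit with hds
  have hfuel : s.length - n < ((s.length : Int) - (n : Int)).toNat + 1 := by omega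
  simp only [grabScanA_eq s n _ hfuel, grabLoopB_eq s n 0 _ hfuel, ← hds]
  by_cases hnil : ds = []
  · rw [if_pos (by rw [hnil]; simp), hnil]; rfl
  · have hne : ((n : Int)) ≠ (n : Int) + (ds.length : Int) := by
      intro h
      exact hnil (List.eq_nil_of_length_eq_zero (by omega))
    rw [if_neg hne]
    have hpre' : ds <+: s.drop n := hds ▸ List.takeWhile_prefix _
    have hslice : PySem.List.slice s (some (n : Int)) (some ((n : Int) + (ds.length : Int))) = ds := by
      rw [PySem.List.slice_natCast_add]
      exact (List.prefix_iff_eq_take.mp hpre').symm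
    rw [hslice]
    unfold pvIntOfDigits
    rw [if_pos ⟨hnil, List.all_eq_true.mpr (fun c hc => List.mem_takeWhile_imp hc)⟩]
    rfl
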